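-- pv_equiv track=rewrite | github.com/gkdis6/algorithm | 프로그래머스/2/169199. 리코쳇 로봇/리코쳇 로봇.py | solution
-- ===== SOURCE A (Python) =====
-- from collections import deque
--
-- def solution(board):
--     n = len(board)
--     m = len(board[0])
--
--     # 시작 위치와 목표 위치 찾기
--     start = None
--     target = None
--     for i in range(n):
--         for j in range(m):
--             if board[i][j] == 'R':
--                 start = (i, j)
--             elif board[i][j] == 'G':
--                 target = (i, j)
--
--     # 시작 위치가 없거나 목표 위치가 없는 경우 처리 (문제 조건에 따라 생략 가능)
--     if not start or not target:
--         return -1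
--
--     # BFS 초기화
--     queue = deque()
--     queue.append((start[0], start[1], 0))
--     visited = [[False] * m for _ in range(n)]
--     visited[start[0]][start[1]] = True
--
--     # 상, 하, 좌, 우 이동
--     directions = [(-1, 0), (1, 0), (0, -1), (0, 1)]
--
--     while queue:
--         x, y, moves = queue.popleft()
--
--         # 목표에 도달하면 이동 횟수 반환
--         if (x, y) == target:
--             return moves
--
--         # 4가지 방향에 대해 이동 시뮬레이션
--         for dx, dy in directions:
--             nx, ny = x, y
--             # 장애물이나 경계에 닿기 전까지 계속 이동
--             while True:
--                 nx_next = nx + dx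
--                 ny_next = ny + dy
--                 # 경계를 벗어나거나 장애물이 있으면 멈춤
--                 if nx_next < 0 or nx_next >= n or ny_next < 0 or ny_next >= m or board[nx_next][ny_next] == 'D':
--                     break
--                 nx, ny = nx_next, ny_next
--
--             # 이미 방문한 위치라면 넘어감
--             if not visited[nx][ny]:
--                 visited[nx][ny] = True
--                 queue.append((nx, ny, moves + 1))
--
--     # 목표에 도달할 수 없는 경우
--     return -1
-- ===== SOURCE B (Python) =====
-- from collections import deque
--
-- def solution(board):
--     n = len(board)
--     m = len(board[0])
--     # normalized n x m character grid (each row truncated to the board width)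
--     grid = [list(row[:m]) for row in board]
--
--     # last 'R' / last 'G' in row-major order, collected by comprehensions
--     rs = [(i, j) for i, row in enumerate(grid) for j, c in enumerate(row) if c == 'R']
--     gs = [(i, j) for i, row in enumerate(grid) for j, c in enumerate(row) if c == 'G']
--     if not rs or not gs:
--         return -1
--     start = rs[-1]
--     target = gs[-1]
--
--     # wall tables by four linear sweeps: for each cell, where a slide stops
--     L = {}; R = {}; U = {}; Dn = {}
--     for i in range(n):
--         w = 0
--         for j in range(m):
--             L[(i, j)] = w
--             if grid[i][j] == 'D':
--                 w = j + 1
--         w = m - 1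
--         for j in range(m - 1, -1, -1):
--             R[(i, j)] = w
--             if grid[i][j] == 'D':
--                 w = j - 1
--     for j in range(m):
--         w = 0
--         for i in range(n):
--             U[(i, j)] = w
--             if grid[i][j] == 'D':
--                 w = i + 1
--         w = n - 1
--         for i in range(n - 1, -1, -1):
--             Dn[(i, j)] = w
--             if grid[i][j] == 'D':
--                 w = i - 1
--
--     # BFS over the precomputed graph with a visited *set* of cells
--     visited = {start}
--     queue = deque([(start, 0)])
--     while queue:
--         pos, d = queue.popleft()
--         if pos == target:
--             return d
--         x, y = pos
--         for nb in ((U[pos], y), (Dn[pos], y), (x, L[pos]), (x, R[pos])):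
--             if nb not in visited:
--                 visited.add(nb)
--                 queue.append((nb, d + 1))
--     return -1
-- ===== Notes on version B (the rewrite author's own statement) =====
-- stated objective: alternative
-- what changed: B replaces A's per-pop four-direction sliding while-loops by four linear wall sweeps (per row left/right, per column up/down) computed once into landing tables, finds start/target via enumerate-comprehensions taking the last match instead of A's nested index loops with mutable state, and runs the BFS over the precomputed graph with a visited set of cells instead of A's boolean grid.
import Mathlib
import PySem

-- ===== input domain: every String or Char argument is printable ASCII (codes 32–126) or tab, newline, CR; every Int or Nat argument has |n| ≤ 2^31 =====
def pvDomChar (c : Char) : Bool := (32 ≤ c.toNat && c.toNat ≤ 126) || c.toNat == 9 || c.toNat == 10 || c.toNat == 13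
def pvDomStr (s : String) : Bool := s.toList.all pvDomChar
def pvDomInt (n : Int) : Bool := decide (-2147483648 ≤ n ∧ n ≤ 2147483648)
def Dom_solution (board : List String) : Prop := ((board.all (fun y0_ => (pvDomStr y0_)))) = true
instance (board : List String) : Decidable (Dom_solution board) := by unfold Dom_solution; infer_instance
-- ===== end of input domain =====

-- B replaces A's per-pop sliding while-loops by four linear wall sweeps computed once into
-- landing tables, finds start/target by enumerate-comprehensions taking the last match, and
-- runs the BFS over the precomputed graph with a visited set (objective: alternative).

-- ===== PORT A =====
-- A-side helpers
def pvCell (board : List String) (i j : Int) : Char :=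
  ((PySem.List.pyGet? board i).bind (fun s => PySem.Str.pyGet? s j)).getD '?'

def pvScan (board : List String) (n m : Int) :
    Option (Int × Int) × Option (Int × Int) :=
  (PySem.List.pyRange 0 n 1).foldl (fun st i =>
    (PySem.List.pyRange 0 m 1).foldl (fun st j =>
      if pvCell board i j = 'R' then (some (i, j), st.2)
      else if pvCell board i j = 'G' then (st.1, some (i, j))
      else st) st) (none, none)

def pvVisInit (n m : Int) : List (List Bool) :=
  (PySem.List.pyRange 0 n 1).map (fun _ => List.replicate m.toNat false)

def pvVisGet (vis : List (List Bool)) (x y : Int) : Bool :=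
  ((PySem.List.pyGet? vis x).bind (fun r => PySem.List.pyGet? r y)).getD true

def pvVisSet (vis : List (List Bool)) (x y : Int) : List (List Bool) :=
  PySem.List.pySetD vis x (PySem.List.pySetD ((PySem.List.pyGet? vis x).getD []) y true)

-- A's inner 'while True' slide in direction (dx,dy); fuel (n+m)+1 bounds the step count
def slideA (board : List String) (n m dx dy : Int) : Nat → Int × Int → Int × Int
  | 0, p => p
  | f + 1, (x, y) =>
    let nx := x + dx
    let ny := y + dy
    if nx < 0 ∨ n ≤ nx ∨ ny < 0 ∨ m ≤ ny ∨ pvCell board nx ny = 'D' then (x, y)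
    else slideA board n m dx dy f (nx, ny)

-- A's BFS loop; fuel n*m+1 bounds the number of pops (each enqueue marks a fresh cell)
def bfsA (board : List String) (n m : Int) (t : Int × Int) :
    Nat → List (Int × Int × Int) → List (List Bool) → Int
  | 0, _, _ => -1
  | _ + 1, [], _ => -1
  | f + 1, (x, y, moves) :: qs, vis =>
    if (x, y) = t then moves
    else
      let st := [((-1 : Int), (0 : Int)), (1, 0), (0, -1), (0, 1)].foldl
        (fun (st : List (Int × Int × Int) × List (List Bool)) d =>
          let p := slideA board n m d.1 d.2 ((n + m).toNat + 1) (x, y)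
          if pvVisGet st.2 p.1 p.2 then st
          else (st.1 ++ [(p.1, p.2, moves + 1)], pvVisSet st.2 p.1 p.2)) (qs, vis)
      bfsA board n m t f st.1 st.2

def solution (board : List String) : Int :=
  let n := PySem.List.len board
  let m := PySem.Str.len ((PySem.List.pyGet? board 0).getD "")  -- board[0]: Pre_ excludes board = []
  match pvScan board n m with
  | (some s, some t) =>
      bfsA board n m t ((n * m).toNat + 1) [(s.1, s.2, 0)]
        (pvVisSet (pvVisInit n m) s.1 s.2)
  | _ => -1

-- ===== PORT B =====
-- B-side helpers (Source B's code, transliterated)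
-- grid[i][j]; total form, always queried in range under Pre_
def gAt (g : List (List Char)) (i j : Int) : Char :=
  PySem.List.pyGetD (PySem.List.pyGetD g i []) j '?'

-- [(i, j) for i, row in enumerate(grid) for j, c in enumerate(row) if c == ch]
def rposs (g : List (List Char)) (ch : Char) : List (Int × Int) :=
  (PySem.List.enumerate g).flatMap (fun ir =>
    (PySem.List.enumerate ir.2).filterMap (fun jc =>
      if jc.2 = ch then some (ir.1, jc.1) else none))

-- the two row sweeps of Source B: left walls (j ascending) and right walls (j descending)
def tblLR (g : List (List Char)) (n m : Int) :
    PySem.Dict (Int × Int) Int × PySem.Dict (Int × Int) Int :=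
  (PySem.List.pyRange 0 n 1).foldl (fun LR i =>
    let Lw := (PySem.List.pyRange 0 m 1).foldl
      (fun (Lw : PySem.Dict (Int × Int) Int × Int) j =>
        (Lw.1.insert (i, j) Lw.2,
         if gAt g i j = 'D' then j + 1 else Lw.2)) (LR.1, 0)
    let Rw := (PySem.List.pyRange (m - 1) (-1) (-1)).foldl
      (fun (Rw : PySem.Dict (Int × Int) Int × Int) j =>
        (Rw.1.insert (i, j) Rw.2,
         if gAt g i j = 'D' then j - 1 else Rw.2)) (LR.2, m - 1)
    (Lw.1, Rw.1)) (PySem.Dict.empty, PySem.Dict.empty)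

-- the two column sweeps of Source B: up walls (i ascending) and down walls (i descending)
def tblUD (g : List (List Char)) (n m : Int) :
    PySem.Dict (Int × Int) Int × PySem.Dict (Int × Int) Int :=
  (PySem.List.pyRange 0 m 1).foldl (fun UD j =>
    let Uw := (PySem.List.pyRange 0 n 1).foldl
      (fun (Uw : PySem.Dict (Int × Int) Int × Int) i =>
        (Uw.1.insert (i, j) Uw.2,
         if gAt g i j = 'D' then i + 1 else Uw.2)) (UD.1, 0)
    let Dw := (PySem.List.pyRange (n - 1) (-1) (-1)).foldl
      (fun (Dw : PySem.Dict (Int × Int) Int × Int) i =>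
        (Dw.1.insert (i, j) Dw.2,
         if gAt g i j = 'D' then i - 1 else Dw.2)) (UD.2, n - 1)
    (Uw.1, Dw.1)) (PySem.Dict.empty, PySem.Dict.empty)

-- B's BFS over the table graph, visited as a Python set of cells; queue holds (pos, dist)
def bfsB (dU dDn dL dR : PySem.Dict (Int × Int) Int) (t : Int × Int) :
    Nat → List ((Int × Int) × Int) → PySem.Set (Int × Int) → Int
  | 0, _, _ => -1
  | _ + 1, [], _ => -1
  | f + 1, ((x, y), d) :: qs, vis =>
    if (x, y) = t then d
    else
      let st := [(dU.getD (x, y) 0, y), (dDn.getD (x, y) 0, y),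
                 (x, dL.getD (x, y) 0), (x, dR.getD (x, y) 0)].foldl
        (fun (st : List ((Int × Int) × Int) × PySem.Set (Int × Int)) nb =>
          if st.2.contains nb then st
          else (st.1 ++ [(nb, d + 1)], PySem.Set.add st.2 nb)) (qs, vis)
      bfsB dU dDn dL dR t f st.1 st.2

def solution_alt (board : List String) : Int :=
  let n := PySem.List.len board
  let m := PySem.Str.len ((PySem.List.pyGet? board 0).getD "")  -- board[0]: Pre_ excludes board = []
  -- grid = [list(row[:m]) for row in board]
  let grid := board.map (fun r => (PySem.Str.slice r none (some m)).toList)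
  -- rs[-1] / gs[-1]; the match's catch-all is 'if not rs or not gs: return -1'
  match PySem.List.pyGet? (rposs grid 'R') (-1) with
  | none => -1
  | some s =>
    match PySem.List.pyGet? (rposs grid 'G') (-1) with
    | none => -1
    | some t =>
      let LR := tblLR grid n m
      let UD := tblUD grid n m
      bfsB UD.1 UD.2 LR.1 LR.2 t ((n * m).toNat + 1) [(s, 0)] (PySem.Set.ofList [s])

-- ===== PRECONDITION & SPEC =====
-- Pre_ excludes exactly the inputs where Python A raises IndexError: the empty board
-- (board[0]) and boards with a row shorter than row 0 (board[i][j], j < len(board[0])).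
def Pre_solution (board : List String) : Prop :=
  board ≠ [] ∧ ∀ s ∈ board, (board.headD "").toList.length ≤ s.toList.length
instance (board : List String) : Decidable (Pre_solution board) := by
  unfold Pre_solution; infer_instance

def pvWitness_solution : List String := ["R.G", ".D."]

def Spec_solution (board : List String) (out : Int) : Prop := out = solution_alt board
instance (board : List String) (out : Int) : Decidable (Spec_solution board out) := by
  unfold Spec_solution; infer_instance

-- ===== CLAIM (what is proved, stated in full; the proofs are below) =====
def Claim_equal_solution : Prop :=
  ∀ (board : List String), Dom_solution board → Pre_solution board →
    Spec_solution board (solution board)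

-- ===== LEMMAS AND PROOFS =====

-- wall-value functions over an abstract cell reader (proof-side only)
def wL (c : Int → Int → Char) (x : Int) : Nat → Int
  | 0 => 0
  | k + 1 => if c x k = 'D' then (k : Int) + 1 else wL c x k

def wU (c : Int → Int → Char) (y : Int) : Nat → Int
  | 0 => 0
  | k + 1 => if c k y = 'D' then (k : Int) + 1 else wU c y k

def vR (c : Int → Int → Char) (x m : Int) : Nat → Int
  | 0 => m - 1
  | k + 1 => if c x (m - 1 - (k : Int)) = 'D' then (m - 1 - (k : Int)) - 1
             else vR c x m k

def vD (c : Int → Int → Char) (y n : Int) : Nat → Int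
  | 0 => n - 1
  | k + 1 => if c (n - 1 - (k : Int)) y = 'D' then (n - 1 - (k : Int)) - 1
             else vD c y n k

-- the four slides of A compute the wall values
lemma slide_up (board : List String) (n m : Int) :
    ∀ (f : Nat) (x y : Int), 0 ≤ x → x < n → 0 ≤ y → y < m → x.toNat < f →
    slideA board n m (-1) 0 f (x, y) = (wU (pvCell board) y x.toNat, y) := by
  intro f
  induction f with
  | zero => omega
  | succ f ih =>
    intro x y hx hxn hy hym hf
    rw [slideA]
    by_cases hstop : x + -1 < 0 ∨ n ≤ x + -1 ∨ y + 0 < 0 ∨ m ≤ y + 0 ∨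
        pvCell board (x + -1) (y + 0) = 'D'
    · simp only [if_pos hstop]
      by_cases hx0 : x = 0
      · subst hx0; simp [wU]
      · have hD : pvCell board (x + -1) (y + 0) = 'D' := by
          rcases hstop with h | h | h | h | h
          · exact absurd h (by omega)
          · exact absurd h (by omega)
          · exact absurd h (by omega)
          · exact absurd h (by omega)
          · exact h
        have hx1 : x.toNat = (x.toNat - 1) + 1 := by omega
        rw [hx1, wU]
        have hc : ((x.toNat - 1 : Nat) : Int) = x + -1 := by omega
        rw [hc, if_pos (by simpa using hD)]
        simp only [Prod.mk.injEq]
        exact ⟨by omega, by simp⟩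
    · simp only [if_neg hstop]
      push Not at hstop
      have h1 := ih (x + -1) (y + 0) (by omega) (by omega) (by omega) (by omega) (by omega)
      rw [h1]
      have hx1 : x.toNat = (x + -1).toNat + 1 := by omega
      rw [hx1, wU]
      have hc : (((x + -1).toNat : Nat) : Int) = x + -1 := by omega
      rw [hc, if_neg (by simpa using hstop.2.2.2.2)]
      simp

lemma slide_down (board : List String) (n m : Int) :
    ∀ (f : Nat) (x y : Int), 0 ≤ x → x < n → 0 ≤ y → y < m → (n - 1 - x).toNat < f →
    slideA board n m 1 0 f (x, y) = (vD (pvCell board) y n (n - 1 - x).toNat, y) := by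
  intro f
  induction f with
  | zero => omega
  | succ f ih =>
    intro x y hx hxn hy hym hf
    rw [slideA]
    by_cases hstop : x + 1 < 0 ∨ n ≤ x + 1 ∨ y + 0 < 0 ∨ m ≤ y + 0 ∨
        pvCell board (x + 1) (y + 0) = 'D'
    · simp only [if_pos hstop]
      by_cases hx0 : x = n - 1
      · have hk : (n - 1 - x).toNat = 0 := by omega
        rw [hk, vD]
        simp only [Prod.mk.injEq]
        exact ⟨by omega, by simp⟩
      · have hD : pvCell board (x + 1) (y + 0) = 'D' := by
          rcases hstop with h | h | h | h | h
          · exact absurd h (by omega)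
          · exact absurd h (by omega)
          · exact absurd h (by omega)
          · exact absurd h (by omega)
          · exact h
        have hx1 : (n - 1 - x).toNat = ((n - 1 - x).toNat - 1) + 1 := by omega
        rw [hx1, vD]
        have hc : ((((n - 1 - x).toNat - 1) : Nat) : Int) = n - 2 - x := by omega
        rw [hc]
        have hc2 : n - 1 - (n - 2 - x) = x + 1 := by ring
        rw [hc2, if_pos (by simpa using hD)]
        simp only [Prod.mk.injEq]
        exact ⟨by omega, by simp⟩
    · simp only [if_neg hstop]
      push Not at hstop
      have h1 := ih (x + 1) (y + 0) (by omega) (by omega) (by omega) (by omega) (by omega)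
      rw [h1]
      have hx1 : (n - 1 - x).toNat = (n - 1 - (x + 1)).toNat + 1 := by omega
      rw [hx1, vD]
      have hc : (((n - 1 - (x + 1)).toNat : Nat) : Int) = n - 2 - x := by omega
      rw [hc]
      have hc2 : n - 1 - (n - 2 - x) = x + 1 := by ring
      rw [hc2, if_neg (by simpa using hstop.2.2.2.2)]
      simp only [Prod.mk.injEq]
      constructor
      · have : n - 1 - (x + 1) = n - 2 - x := by ring
        rw [this]; norm_num
      · simp

lemma slide_left (board : List String) (n m : Int) :
    ∀ (f : Nat) (x y : Int), 0 ≤ x → x < n → 0 ≤ y → y < m → y.toNat < f →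
    slideA board n m 0 (-1) f (x, y) = (x, wL (pvCell board) x y.toNat) := by
  intro f
  induction f with
  | zero => omega
  | succ f ih =>
    intro x y hx hxn hy hym hf
    rw [slideA]
    by_cases hstop : x + 0 < 0 ∨ n ≤ x + 0 ∨ y + -1 < 0 ∨ m ≤ y + -1 ∨
        pvCell board (x + 0) (y + -1) = 'D'
    · simp only [if_pos hstop]
      by_cases hy0 : y = 0
      · subst hy0; simp [wL]
      · have hD : pvCell board (x + 0) (y + -1) = 'D' := by
          rcases hstop with h | h | h | h | h
          · exact absurd h (by omega)
          · exact absurd h (by omega)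
          · exact absurd h (by omega)
          · exact absurd h (by omega)
          · exact h
        have hy1 : y.toNat = (y.toNat - 1) + 1 := by omega
        rw [hy1, wL]
        have hc : ((y.toNat - 1 : Nat) : Int) = y + -1 := by omega
        rw [hc, if_pos (by simpa using hD)]
        simp only [Prod.mk.injEq]
        exact ⟨by simp, by omega⟩
    · simp only [if_neg hstop]
      push Not at hstop
      have h1 := ih (x + 0) (y + -1) (by omega) (by omega) (by omega) (by omega) (by omega)
      rw [h1]
      have hy1 : y.toNat = (y + -1).toNat + 1 := by omega
      rw [hy1, wL]
      have hc : (((y + -1).toNat : Nat) : Int) = y + -1 := by omega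
      rw [hc, if_neg (by simpa using hstop.2.2.2.2)]
      simp

lemma slide_right (board : List String) (n m : Int) :
    ∀ (f : Nat) (x y : Int), 0 ≤ x → x < n → 0 ≤ y → y < m → (m - 1 - y).toNat < f →
    slideA board n m 0 1 f (x, y) = (x, vR (pvCell board) x m (m - 1 - y).toNat) := by
  intro f
  induction f with
  | zero => omega
  | succ f ih =>
    intro x y hx hxn hy hym hf
    rw [slideA]
    by_cases hstop : x + 0 < 0 ∨ n ≤ x + 0 ∨ y + 1 < 0 ∨ m ≤ y + 1 ∨
        pvCell board (x + 0) (y + 1) = 'D'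
    · simp only [if_pos hstop]
      by_cases hy0 : y = m - 1
      · have hk : (m - 1 - y).toNat = 0 := by omega
        rw [hk, vR]
        simp only [Prod.mk.injEq]
        exact ⟨by simp, by omega⟩
      · have hD : pvCell board (x + 0) (y + 1) = 'D' := by
          rcases hstop with h | h | h | h | h
          · exact absurd h (by omega)
          · exact absurd h (by omega)
          · exact absurd h (by omega)
          · exact absurd h (by omega)
          · exact h
        have hy1 : (m - 1 - y).toNat = ((m - 1 - y).toNat - 1) + 1 := by omega
        rw [hy1, vR]
        have hc : ((((m - 1 - y).toNat - 1) : Nat) : Int) = m - 2 - y := by omega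
        rw [hc]
        have hc2 : m - 1 - (m - 2 - y) = y + 1 := by ring
        rw [hc2, if_pos (by simpa using hD)]
        simp only [Prod.mk.injEq]
        exact ⟨by simp, by omega⟩
    · simp only [if_neg hstop]
      push Not at hstop
      have h1 := ih (x + 0) (y + 1) (by omega) (by omega) (by omega) (by omega) (by omega)
      rw [h1]
      have hy1 : (m - 1 - y).toNat = (m - 1 - (y + 1)).toNat + 1 := by omega
      rw [hy1, vR]
      have hc : (((m - 1 - (y + 1)).toNat : Nat) : Int) = m - 2 - y := by omega
      rw [hc]
      have hc2 : m - 1 - (m - 2 - y) = y + 1 := by ring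
      rw [hc2, if_neg (by simpa using hstop.2.2.2.2)]
      simp only [Prod.mk.injEq]
      constructor
      · simp
      · have : m - 1 - (y + 1) = m - 2 - y := by ring
        rw [this]; norm_num

lemma slide_in_range (board : List String) (n m dx dy : Int) :
    ∀ (f : Nat) (x y : Int), 0 ≤ x → x < n → 0 ≤ y → y < m →
    0 ≤ (slideA board n m dx dy f (x, y)).1 ∧ (slideA board n m dx dy f (x, y)).1 < n ∧
    0 ≤ (slideA board n m dx dy f (x, y)).2 ∧ (slideA board n m dx dy f (x, y)).2 < m := by
  intro f
  induction f with
  | zero => intro x y hx hxn hy hym; exact ⟨hx, hxn, hy, hym⟩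
  | succ f ih =>
    intro x y hx hxn hy hym
    rw [slideA]
    by_cases hstop : x + dx < 0 ∨ n ≤ x + dx ∨ y + dy < 0 ∨ m ≤ y + dy ∨
        pvCell board (x + dx) (y + dy) = 'D'
    · simp only [if_pos hstop]; exact ⟨hx, hxn, hy, hym⟩
    · simp only [if_neg hstop]
      push Not at hstop
      exact ih (x + dx) (y + dy) (by omega) (by omega) (by omega) (by omega)

-- an ascending sweep 'for j in range(a,b): d[key j]=w; if cf j=='D': w=j+1' fills, for each
-- visited j, the wall value wal j, and leaves every other key of the dict untouched
lemma sweep_asc (key : Int → Int × Int) (cf : Int → Char) (wal : Nat → Int)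
    (hrec : ∀ k : Nat, wal (k + 1) = if cf (k : Int) = 'D' then (k : Int) + 1 else wal k)
    (hinj : ∀ j j' : Int, key j = key j' → j = j') (b : Int) :
    ∀ (a : Int) (d : PySem.Dict (Int × Int) Int) (w0 : Int), 0 ≤ a → w0 = wal a.toNat →
      (∀ j : Int, a ≤ j → j < b →
        ((PySem.List.pyRange a b 1).foldl
          (fun (St : PySem.Dict (Int × Int) Int × Int) j =>
            (St.1.insert (key j) St.2, if cf j = 'D' then j + 1 else St.2))
          (d, w0)).1.get? (key j) = some (wal j.toNat)) ∧
      (∀ q : Int × Int, (∀ j : Int, a ≤ j → j < b → q ≠ key j) →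
        ((PySem.List.pyRange a b 1).foldl
          (fun (St : PySem.Dict (Int × Int) Int × Int) j =>
            (St.1.insert (key j) St.2, if cf j = 'D' then j + 1 else St.2))
          (d, w0)).1.get? q = d.get? q) := by
  intro a
  have H : ∀ (N : Nat) (a : Int), (b - a).toNat = N → ∀ (d : PySem.Dict (Int × Int) Int)
      (w0 : Int), 0 ≤ a → w0 = wal a.toNat →
      (∀ j : Int, a ≤ j → j < b →
        ((PySem.List.pyRange a b 1).foldl
          (fun (St : PySem.Dict (Int × Int) Int × Int) j =>
            (St.1.insert (key j) St.2, if cf j = 'D' then j + 1 else St.2))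
          (d, w0)).1.get? (key j) = some (wal j.toNat)) ∧
      (∀ q : Int × Int, (∀ j : Int, a ≤ j → j < b → q ≠ key j) →
        ((PySem.List.pyRange a b 1).foldl
          (fun (St : PySem.Dict (Int × Int) Int × Int) j =>
            (St.1.insert (key j) St.2, if cf j = 'D' then j + 1 else St.2))
          (d, w0)).1.get? q = d.get? q) := by
    intro N
    induction N with
    | zero =>
      intro a hN d w0 ha hw0
      rw [PySem.List.pyRange_one_eq_nil (by omega)]
      constructor
      · intro j hj1 hj2; omega
      · intro q hq; rfl
    | succ N ihN =>
      intro a hN d w0 ha hw0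
      rw [PySem.List.pyRange_one_cons (by omega), List.foldl_cons]
      have hw1 : (if cf a = 'D' then a + 1 else w0) = wal (a + 1).toNat := by
        have hk : (a + 1).toNat = a.toNat + 1 := by omega
        rw [hk, hrec]
        have hca : ((a.toNat : Nat) : Int) = a := by omega
        rw [hca, hw0]
      have ih := ihN (a + 1) (by omega) (d.insert (key a) w0)
        (if cf a = 'D' then a + 1 else w0) (by omega) hw1
      constructor
      · intro j hj1 hj2
        by_cases hja : j = a
        · subst hja
          rw [ih.2 (key j) ?_]
          · rw [PySem.Dict.get?_insert_self, hw0]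
          · intro j' hj'1 hj'2 hkey
            have := hinj _ _ hkey
            omega
        · exact ih.1 j (by omega) hj2
      · intro q hq
        rw [ih.2 q (fun j hj1 hj2 => hq j (by omega) hj2)]
        apply PySem.Dict.get?_insert_of_ne
        exact hq a (by omega) (by omega)
  exact fun d w0 ha hw0 => H (b - a).toNat a rfl d w0 ha hw0

-- the descending sweep 'for j in range(c,-1,-1): d[key j]=w; if cf j=='D': w=j-1',
-- with wal k the wall value at index b-1-k (b = the exclusive top of the axis)
lemma sweep_desc (key : Int → Int × Int) (cf : Int → Char) (wal : Nat → Int) (b : Int)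
    (hrec : ∀ k : Nat, wal (k + 1) =
      if cf (b - 1 - (k : Int)) = 'D' then (b - 1 - (k : Int)) - 1 else wal k)
    (hinj : ∀ j j' : Int, key j = key j' → j = j') :
    ∀ (c : Int) (d : PySem.Dict (Int × Int) Int) (w0 : Int), c < b → w0 = wal (b - 1 - c).toNat →
      (∀ j : Int, 0 ≤ j → j ≤ c →
        ((PySem.List.pyRange c (-1) (-1)).foldl
          (fun (St : PySem.Dict (Int × Int) Int × Int) j =>
            (St.1.insert (key j) St.2, if cf j = 'D' then j - 1 else St.2))
          (d, w0)).1.get? (key j) = some (wal (b - 1 - j).toNat)) ∧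
      (∀ q : Int × Int, (∀ j : Int, 0 ≤ j → j ≤ c → q ≠ key j) →
        ((PySem.List.pyRange c (-1) (-1)).foldl
          (fun (St : PySem.Dict (Int × Int) Int × Int) j =>
            (St.1.insert (key j) St.2, if cf j = 'D' then j - 1 else St.2))
          (d, w0)).1.get? q = d.get? q) := by
  intro c
  have H : ∀ (N : Nat) (c : Int), (c + 1).toNat = N → ∀ (d : PySem.Dict (Int × Int) Int)
      (w0 : Int), c < b → w0 = wal (b - 1 - c).toNat →
      (∀ j : Int, 0 ≤ j → j ≤ c →
        ((PySem.List.pyRange c (-1) (-1)).foldl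
          (fun (St : PySem.Dict (Int × Int) Int × Int) j =>
            (St.1.insert (key j) St.2, if cf j = 'D' then j - 1 else St.2))
          (d, w0)).1.get? (key j) = some (wal (b - 1 - j).toNat)) ∧
      (∀ q : Int × Int, (∀ j : Int, 0 ≤ j → j ≤ c → q ≠ key j) →
        ((PySem.List.pyRange c (-1) (-1)).foldl
          (fun (St : PySem.Dict (Int × Int) Int × Int) j =>
            (St.1.insert (key j) St.2, if cf j = 'D' then j - 1 else St.2))
          (d, w0)).1.get? q = d.get? q) := by
    intro N
    induction N with
    | zero =>
      intro c hN d w0 hc hw0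
      rw [PySem.List.pyRange_neg_one_eq_nil (by omega)]
      constructor
      · intro j hj1 hj2; omega
      · intro q hq; rfl
    | succ N ihN =>
      intro c hN d w0 hc hw0
      rw [PySem.List.pyRange_neg_one_cons (by omega), List.foldl_cons]
      have hw1 : (if cf c = 'D' then c - 1 else w0) = wal (b - 1 - (c - 1)).toNat := by
        have hk : (b - 1 - (c - 1)).toNat = (b - 1 - c).toNat + 1 := by omega
        rw [hk, hrec]
        have hca : (((b - 1 - c).toNat : Nat) : Int) = b - 1 - c := by omega
        rw [hca, hw0]
        have hcc : b - 1 - (b - 1 - c) = c := by ring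
        rw [hcc]
      have ih := ihN (c - 1) (by omega) (d.insert (key c) w0)
        (if cf c = 'D' then c - 1 else w0) (by omega) hw1
      constructor
      · intro j hj1 hj2
        by_cases hjc : j = c
        · subst hjc
          rw [ih.2 (key j) ?_]
          · rw [PySem.Dict.get?_insert_self, hw0]
          · intro j' hj'1 hj'2 hkey
            have := hinj _ _ hkey
            omega
        · exact ih.1 j hj1 (by omega)
      · intro q hq
        rw [ih.2 q (fun j hj1 hj2 => hq j hj1 (by omega))]
        apply PySem.Dict.get?_insert_of_ne
        exact hq c (by omega) (by omega)
  exact fun d w0 hc hw0 => H (c + 1).toNat c rfl d w0 hc hw0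

-- the outer row/column loops of the sweeps, named for the proofs
def GLR (g : List (List Char)) (m : Int)
    (LR : PySem.Dict (Int × Int) Int × PySem.Dict (Int × Int) Int)
    (i : Int) : PySem.Dict (Int × Int) Int × PySem.Dict (Int × Int) Int :=
  let Lw := (PySem.List.pyRange 0 m 1).foldl
    (fun (Lw : PySem.Dict (Int × Int) Int × Int) j =>
      (Lw.1.insert (i, j) Lw.2,
       if gAt g i j = 'D' then j + 1 else Lw.2)) (LR.1, 0)
  let Rw := (PySem.List.pyRange (m - 1) (-1) (-1)).foldl
    (fun (Rw : PySem.Dict (Int × Int) Int × Int) j =>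
      (Rw.1.insert (i, j) Rw.2,
       if gAt g i j = 'D' then j - 1 else Rw.2)) (LR.2, m - 1)
  (Lw.1, Rw.1)

def GUD (g : List (List Char)) (n : Int)
    (UD : PySem.Dict (Int × Int) Int × PySem.Dict (Int × Int) Int)
    (j : Int) : PySem.Dict (Int × Int) Int × PySem.Dict (Int × Int) Int :=
  let Uw := (PySem.List.pyRange 0 n 1).foldl
    (fun (Uw : PySem.Dict (Int × Int) Int × Int) i =>
      (Uw.1.insert (i, j) Uw.2,
       if gAt g i j = 'D' then i + 1 else Uw.2)) (UD.1, 0)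
  let Dw := (PySem.List.pyRange (n - 1) (-1) (-1)).foldl
    (fun (Dw : PySem.Dict (Int × Int) Int × Int) i =>
      (Dw.1.insert (i, j) Dw.2,
       if gAt g i j = 'D' then i - 1 else Dw.2)) (UD.2, n - 1)
  (Uw.1, Dw.1)

lemma tblLR_eq (g : List (List Char)) (n m : Int) :
    tblLR g n m = (PySem.List.pyRange 0 n 1).foldl (GLR g m)
      (PySem.Dict.empty, PySem.Dict.empty) := rfl

lemma tblUD_eq (g : List (List Char)) (n m : Int) :
    tblUD g n m = (PySem.List.pyRange 0 m 1).foldl (GUD g n)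
      (PySem.Dict.empty, PySem.Dict.empty) := rfl

lemma GLR_spec (g : List (List Char)) (m : Int)
    (d0 : PySem.Dict (Int × Int) Int × PySem.Dict (Int × Int) Int) (i : Int) :
    (∀ y : Int, 0 ≤ y → y < m →
      (GLR g m d0 i).1.get? (i, y) = some (wL (gAt g) i y.toNat) ∧
      (GLR g m d0 i).2.get? (i, y) = some (vR (gAt g) i m (m - 1 - y).toNat)) ∧
    (∀ q : Int × Int, q.1 ≠ i →
      (GLR g m d0 i).1.get? q = d0.1.get? q ∧
      (GLR g m d0 i).2.get? q = d0.2.get? q) := by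
  have hL := sweep_asc (fun j => (i, j)) (fun j => gAt g i j) (wL (gAt g) i)
    (fun k => rfl) (fun j j' h => (Prod.mk.injEq _ _ _ _).mp h |>.2) m 0 d0.1 0 le_rfl rfl
  have hR := sweep_desc (fun j => (i, j)) (fun j => gAt g i j) (vR (gAt g) i m) m
    (fun k => rfl) (fun j j' h => (Prod.mk.injEq _ _ _ _).mp h |>.2) (m - 1) d0.2 (m - 1)
    (by omega) (by rw [show m - 1 - (m - 1) = 0 from by ring]; rfl)
  constructor
  · intro y hy1 hy2
    exact ⟨hL.1 y hy1 hy2, hR.1 y hy1 (by omega)⟩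
  · intro q hq
    constructor
    · exact hL.2 q (fun j h1 h2 hkey => hq (by rw [hkey]))
    · exact hR.2 q (fun j h1 h2 hkey => hq (by rw [hkey]))

lemma GUD_spec (g : List (List Char)) (n : Int)
    (d0 : PySem.Dict (Int × Int) Int × PySem.Dict (Int × Int) Int) (j : Int) :
    (∀ x : Int, 0 ≤ x → x < n →
      (GUD g n d0 j).1.get? (x, j) = some (wU (gAt g) j x.toNat) ∧
      (GUD g n d0 j).2.get? (x, j) = some (vD (gAt g) j n (n - 1 - x).toNat)) ∧
    (∀ q : Int × Int, q.2 ≠ j →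
      (GUD g n d0 j).1.get? q = d0.1.get? q ∧
      (GUD g n d0 j).2.get? q = d0.2.get? q) := by
  have hU := sweep_asc (fun i => (i, j)) (fun i => gAt g i j) (wU (gAt g) j)
    (fun k => rfl) (fun i i' h => (Prod.mk.injEq _ _ _ _).mp h |>.1) n 0 d0.1 0 le_rfl rfl
  have hD := sweep_desc (fun i => (i, j)) (fun i => gAt g i j) (vD (gAt g) j n) n
    (fun k => rfl) (fun i i' h => (Prod.mk.injEq _ _ _ _).mp h |>.1) (n - 1) d0.2 (n - 1)
    (by omega) (by rw [show n - 1 - (n - 1) = 0 from by ring]; rfl)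
  constructor
  · intro x hx1 hx2
    exact ⟨hU.1 x hx1 hx2, hD.1 x hx1 (by omega)⟩
  · intro q hq
    constructor
    · exact hU.2 q (fun i h1 h2 hkey => hq (by rw [hkey]))
    · exact hD.2 q (fun i h1 h2 hkey => hq (by rw [hkey]))

lemma tblLR_spec (g : List (List Char)) (n m : Int) :
    ∀ x y : Int, 0 ≤ x → x < n → 0 ≤ y → y < m →
      (tblLR g n m).1.get? (x, y) = some (wL (gAt g) x y.toNat) ∧
      (tblLR g n m).2.get? (x, y) = some (vR (gAt g) x m (m - 1 - y).toNat) := by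
  have H : ∀ (K : Nat) (a : Int), (n - a).toNat = K →
      ∀ d0 : PySem.Dict (Int × Int) Int × PySem.Dict (Int × Int) Int,
      (∀ x y : Int, a ≤ x → x < n → 0 ≤ y → y < m →
        ((PySem.List.pyRange a n 1).foldl (GLR g m) d0).1.get? (x, y) =
          some (wL (gAt g) x y.toNat) ∧
        ((PySem.List.pyRange a n 1).foldl (GLR g m) d0).2.get? (x, y) =
          some (vR (gAt g) x m (m - 1 - y).toNat)) ∧
      (∀ q : Int × Int, q.1 < a ∨ n ≤ q.1 →
        ((PySem.List.pyRange a n 1).foldl (GLR g m) d0).1.get? q = d0.1.get? q ∧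
        ((PySem.List.pyRange a n 1).foldl (GLR g m) d0).2.get? q = d0.2.get? q) := by
    intro K
    induction K with
    | zero =>
      intro a hK d0
      rw [PySem.List.pyRange_one_eq_nil (by omega)]
      exact ⟨fun x y h1 h2 _ _ => by omega, fun q hq => ⟨rfl, rfl⟩⟩
    | succ K ihK =>
      intro a hK d0
      rw [PySem.List.pyRange_one_cons (by omega), List.foldl_cons]
      have ih := ihK (a + 1) (by omega) (GLR g m d0 a)
      constructor
      · intro x y hx1 hx2 hy1 hy2
        by_cases hxa : x = a
        · subst hxa
          have hun := ih.2 (x, y) (by left; simp)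
          rw [hun.1, hun.2]
          exact (GLR_spec g m d0 x).1 y hy1 hy2
        · exact ih.1 x y (by omega) hx2 hy1 hy2
      · intro q hq
        have hun := ih.2 q (by omega)
        rw [hun.1, hun.2]
        exact (GLR_spec g m d0 a).2 q (by omega)
  intro x y hx1 hx2 hy1 hy2
  rw [tblLR_eq]
  exact (H (n - 0).toNat 0 rfl (PySem.Dict.empty, PySem.Dict.empty)).1 x y hx1 hx2 hy1 hy2

lemma tblUD_spec (g : List (List Char)) (n m : Int) :
    ∀ x y : Int, 0 ≤ x → x < n → 0 ≤ y → y < m →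
      (tblUD g n m).1.get? (x, y) = some (wU (gAt g) y x.toNat) ∧
      (tblUD g n m).2.get? (x, y) = some (vD (gAt g) y n (n - 1 - x).toNat) := by
  have H : ∀ (K : Nat) (a : Int), (m - a).toNat = K →
      ∀ d0 : PySem.Dict (Int × Int) Int × PySem.Dict (Int × Int) Int,
      (∀ x y : Int, 0 ≤ x → x < n → a ≤ y → y < m →
        ((PySem.List.pyRange a m 1).foldl (GUD g n) d0).1.get? (x, y) =
          some (wU (gAt g) y x.toNat) ∧
        ((PySem.List.pyRange a m 1).foldl (GUD g n) d0).2.get? (x, y) =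
          some (vD (gAt g) y n (n - 1 - x).toNat)) ∧
      (∀ q : Int × Int, q.2 < a ∨ m ≤ q.2 →
        ((PySem.List.pyRange a m 1).foldl (GUD g n) d0).1.get? q = d0.1.get? q ∧
        ((PySem.List.pyRange a m 1).foldl (GUD g n) d0).2.get? q = d0.2.get? q) := by
    intro K
    induction K with
    | zero =>
      intro a hK d0
      rw [PySem.List.pyRange_one_eq_nil (by omega)]
      exact ⟨fun x y h1 h2 h3 _ => by omega, fun q hq => ⟨rfl, rfl⟩⟩
    | succ K ihK =>
      intro a hK d0
      rw [PySem.List.pyRange_one_cons (by omega), List.foldl_cons]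
      have ih := ihK (a + 1) (by omega) (GUD g n d0 a)
      constructor
      · intro x y hx1 hx2 hy1 hy2
        by_cases hya : y = a
        · subst hya
          have hun := ih.2 (x, y) (by left; simp)
          rw [hun.1, hun.2]
          exact (GUD_spec g n d0 y).1 x hx1 hx2
        · exact ih.1 x y hx1 hx2 (by omega) hy2
      · intro q hq
        have hun := ih.2 q (by omega)
        rw [hun.1, hun.2]
        exact (GUD_spec g n d0 a).2 q (by omega)
  intro x y hx1 hx2 hy1 hy2
  rw [tblUD_eq]
  exact (H (m - 0).toNat 0 rfl (PySem.Dict.empty, PySem.Dict.empty)).1 x y hx1 hx2 hy1 hy2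

-- ===== the grid of B reads the same cells as A (under Pre_) =====
set_option maxRecDepth 4096 in
lemma cell_agree (board : List String) (m : Int) (hm : 0 ≤ m)
    (hrows : ∀ s ∈ board, m.toNat ≤ s.toList.length) :
    ∀ i j : Int, 0 ≤ i → i < (board.length : Int) → 0 ≤ j → j < m →
      gAt (board.map (fun r => (PySem.Str.slice r none (some m)).toList)) i j =
        pvCell board i j := by
  intro i j hi hin hj hjm
  have hiN : i.toNat < board.length := by omega
  have hlenrow : m.toNat ≤ (board[i.toNat]'hiN).toList.length :=
    hrows _ (List.getElem_mem hiN)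
  have hjN : j.toNat < (board[i.toNat]'hiN).toList.length := by omega
  have hg1 : PySem.List.pyGetD
      (board.map (fun r => (PySem.Str.slice r none (some m)).toList)) i []
      = ((board[i.toNat]'hiN).toList.take m.toNat) := by
    rw [PySem.List.pyGetD_eq_getElem _ _ hi
      (by rw [List.length_map]; exact_mod_cast hin)]
    rw [List.getElem_map]
    simp only [PySem.Str.toList_slice, PySem.Chars.slice_eq_listSlice]
    rw [PySem.List.slice_to _ hm]
  have hg2 : PySem.List.pyGetD ((board[i.toNat]'hiN).toList.take m.toNat) j '?'
      = (board[i.toNat]'hiN).toList[j.toNat]'hjN := by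
    rw [PySem.List.pyGetD_eq_getElem _ _ hj
      (by rw [List.length_take]; push_cast; omega)]
    exact List.getElem_take
  have hp1 : PySem.List.pyGet? board i = some (board[i.toNat]'hiN) := by
    rw [PySem.List.pyGet?_of_nonneg _ hi, List.getElem?_eq_getElem hiN]
  have hp2 : PySem.Str.pyGet? (board[i.toNat]'hiN) j
      = some ((board[i.toNat]'hiN).toList[j.toNat]'hjN) := by
    rw [PySem.Str.pyGet?_eq, PySem.Chars.pyGet?_eq_listPyGet?,
      PySem.List.pyGet?_of_nonneg _ hj, List.getElem?_eq_getElem hjN]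
  unfold gAt pvCell
  rw [hg1, hg2, hp1]
  simp only [Option.bind_some]
  rw [hp2]
  rfl

-- wall values depend only on the cells actually read
lemma wL_agree (c c' : Int → Int → Char) (x m : Int)
    (h : ∀ j : Int, 0 ≤ j → j < m → c x j = c' x j) :
    ∀ k : Nat, (k : Int) ≤ m → wL c x k = wL c' x k := by
  intro k
  induction k with
  | zero => intro _; rfl
  | succ k ih =>
    intro hk
    rw [wL, wL, h k (by omega) (by omega), ih (by omega)]

lemma wU_agree (c c' : Int → Int → Char) (y n : Int)
    (h : ∀ i : Int, 0 ≤ i → i < n → c i y = c' i y) :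
    ∀ k : Nat, (k : Int) ≤ n → wU c y k = wU c' y k := by
  intro k
  induction k with
  | zero => intro _; rfl
  | succ k ih =>
    intro hk
    rw [wU, wU, h k (by omega) (by omega), ih (by omega)]

lemma vR_agree (c c' : Int → Int → Char) (x m : Int)
    (h : ∀ j : Int, 0 ≤ j → j < m → c x j = c' x j) :
    ∀ k : Nat, (k : Int) ≤ m → vR c x m k = vR c' x m k := by
  intro k
  induction k with
  | zero => intro _; rfl
  | succ k ih =>
    intro hk
    rw [vR, vR, h (m - 1 - (k : Int)) (by omega) (by omega), ih (by omega)]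

lemma vD_agree (c c' : Int → Int → Char) (y n : Int)
    (h : ∀ i : Int, 0 ≤ i → i < n → c i y = c' i y) :
    ∀ k : Nat, (k : Int) ≤ n → vD c y n k = vD c' y n k := by
  intro k
  induction k with
  | zero => intro _; rfl
  | succ k ih =>
    intro hk
    rw [vD, vD, h (n - 1 - (k : Int)) (by omega) (by omega), ih (by omega)]

-- ===== the two scans find the same start/target =====
-- the row-major list of cells holding ch (proof-side)
def hits (board : List String) (n m : Int) (ch : Char) : List (Int × Int) :=
  (PySem.List.pyRange 0 n 1).flatMap (fun i =>
    ((PySem.List.pyRange 0 m 1).filter (fun j => decide (pvCell board i j = ch))).map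
      (fun j => (i, j)))

lemma foldl_some_last {α : Type} (l : List α) (init : Option α) :
    l.foldl (fun _ b => some b) init = l.getLast?.or init := by
  induction l generalizing init with
  | nil => simp
  | cons b l ih =>
    rw [List.foldl_cons, ih]
    cases l with
    | nil => simp
    | cons x t =>
      rw [List.getLast?_cons_cons]
      cases hlast : (x :: t).getLast? with
      | none => simp at hlast
      | some v => simp

lemma scan_eq (board : List String) (n m : Int) :
    pvScan board n m = ((hits board n m 'R').getLast?, (hits board n m 'G').getLast?) := by
  have hin : ∀ i : Int,
      (fun (st : Option (Int × Int) × Option (Int × Int)) j =>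
        if pvCell board i j = 'R' then (some (i, j), st.2)
        else if pvCell board i j = 'G' then (st.1, some (i, j))
        else st) =
      (fun st j =>
        ((if pvCell board i j = 'R' then some (i, j) else st.1),
         (if pvCell board i j = 'G' then some (i, j) else st.2))) := by
    intro i
    funext st j
    by_cases h1 : pvCell board i j = 'R'
    · simp [h1]
    · by_cases h2 : pvCell board i j = 'G' <;> simp [h1, h2]
  have hprod : ∀ (i : Int) (st : Option (Int × Int) × Option (Int × Int)),
      (PySem.List.pyRange 0 m 1).foldl
        (fun (st : Option (Int × Int) × Option (Int × Int)) j =>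
          ((if pvCell board i j = 'R' then some (i, j) else st.1),
           (if pvCell board i j = 'G' then some (i, j) else st.2))) st =
      ((PySem.List.pyRange 0 m 1).foldl
          (fun a j => if pvCell board i j = 'R' then some (i, j) else a) st.1,
       (PySem.List.pyRange 0 m 1).foldl
          (fun b j => if pvCell board i j = 'G' then some (i, j) else b) st.2) := by
    intro i st
    obtain ⟨a, b⟩ := st
    exact PySem.List.foldl_prod_mk
      (f := fun a j => if pvCell board i j = 'R' then some (i, j) else a)
      (g := fun b j => if pvCell board i j = 'G' then some (i, j) else b) _ _ _
  have hcomp : ∀ (ch : Char) (a : Option (Int × Int)),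
      (PySem.List.pyRange 0 n 1).foldl
        (fun a i => (PySem.List.pyRange 0 m 1).foldl
          (fun a j => if pvCell board i j = ch then some (i, j) else a) a) a
      = (hits board n m ch).getLast?.or a := by
    intro ch a
    have h1 : ∀ (i : Int) (a : Option (Int × Int)),
        (PySem.List.pyRange 0 m 1).foldl
          (fun a j => if pvCell board i j = ch then some (i, j) else a) a
        = (((PySem.List.pyRange 0 m 1).filter
              (fun j => decide (pvCell board i j = ch))).map (fun j => (i, j))).foldl
            (fun (a : Option (Int × Int)) p => some p) a := by
      intro i a
      rw [PySem.List.foldl_ite_eq_foldl_filter (p := fun j => pvCell board i j = ch)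
        (f := fun a j => some ((i, j) : Int × Int)), List.foldl_map]
    calc (PySem.List.pyRange 0 n 1).foldl
          (fun a i => (PySem.List.pyRange 0 m 1).foldl
            (fun a j => if pvCell board i j = ch then some (i, j) else a) a) a
        = (PySem.List.pyRange 0 n 1).foldl
            (fun a i => (((PySem.List.pyRange 0 m 1).filter
                (fun j => decide (pvCell board i j = ch))).map (fun j => (i, j))).foldl
              (fun (a : Option (Int × Int)) p => some p) a) a := by
          exact PySem.List.foldl_congr_mem _ _ _ _ (fun a i _ => h1 i a)
      _ = (hits board n m ch).foldl (fun (a : Option (Int × Int)) p => some p) a := by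
          rw [hits, List.foldl_flatMap]
      _ = (hits board n m ch).getLast?.or a := foldl_some_last _ _
  unfold pvScan
  simp only [hin, hprod]
  rw [PySem.List.foldl_prod_mk
    (f := fun a i => (PySem.List.pyRange 0 m 1).foldl
      (fun a j => if pvCell board i j = 'R' then some (i, j) else a) a)
    (g := fun b i => (PySem.List.pyRange 0 m 1).foldl
      (fun b j => if pvCell board i j = 'G' then some (i, j) else b) b)]
  rw [hcomp 'R' none, hcomp 'G' none]
  simp

lemma hits_range (board : List String) (n m : Int) (ch : Char) :
    ∀ p ∈ hits board n m ch, 0 ≤ p.1 ∧ p.1 < n ∧ 0 ≤ p.2 ∧ p.2 < m := by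
  intro p hp
  rw [hits, List.mem_flatMap] at hp
  obtain ⟨i, hi, hp⟩ := hp
  rw [List.mem_map] at hp
  obtain ⟨j, hj, hpe⟩ := hp
  rw [List.mem_filter] at hj
  have hi' := (PySem.List.mem_pyRange_one).mp hi
  have hj' := (PySem.List.mem_pyRange_one).mp hj.1
  subst hpe
  exact ⟨by omega, by omega, by omega, by omega⟩

lemma filterMap_if {α β : Type} (l : List α) (p : α → Prop) [DecidablePred p] (f : α → β) :
    l.filterMap (fun x => if p x then some (f x) else none) =
      (l.filter (fun x => decide (p x))).map f := by
  induction l with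
  | nil => rfl
  | cons x xs ih => by_cases h : p x <;> simp [h, ih]

lemma rposs_eq (board : List String) (n m : Int) (ch : Char)
    (hn : n = (board.length : Int)) (hm : 0 ≤ m)
    (hrows : ∀ s ∈ board, m.toNat ≤ s.toList.length) :
    rposs (board.map (fun r => (PySem.Str.slice r none (some m)).toList)) ch =
      hits board n m ch := by
  set g := board.map (fun r => (PySem.Str.slice r none (some m)).toList) with hg
  have hlen : (PySem.List.len g) = n := by
    simp [PySem.List.len, hg, hn]
  rw [rposs, PySem.List.enumerate_eq_map_pyRange g [], hlen, List.flatMap_map, hits]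
  apply List.flatMap_congr
  intro i hi
  have hi' := (PySem.List.mem_pyRange_one).mp hi
  have hiN : i.toNat < g.length := by simp [hg]; omega
  have hrow : PySem.List.pyGetD g i [] = g[i.toNat] :=
    PySem.List.pyGetD_eq_getElem _ _ hi'.1 (by exact_mod_cast by omega)
  have hrowval : g[i.toNat] = (board[i.toNat]'(by simpa [hg] using hiN)).toList.take m.toNat := by
    simp only [hg, List.getElem_map, PySem.Str.toList_slice, PySem.Chars.slice_eq_listSlice]
    rw [PySem.List.slice_to _ hm]
  have hrlen : (PySem.List.pyGetD g i []).length = m.toNat := by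
    rw [hrow, hrowval, List.length_take]
    have := hrows _ (List.getElem_mem (by simpa [hg] using hiN))
    omega
  rw [PySem.List.enumerate_eq_map_pyRange (PySem.List.pyGetD g i []) '?']
  have hlen2 : PySem.List.len (PySem.List.pyGetD g i []) = m := by
    simp [PySem.List.len, hrlen]; omega
  rw [hlen2, List.filterMap_map]
  have : ∀ j ∈ PySem.List.pyRange 0 m 1,
      (fun jc : Int × Char => if jc.2 = ch then some (i, jc.1) else none)
          ((fun j => (j, PySem.List.pyGetD (PySem.List.pyGetD g i []) j '?')) j) =
        (fun j => if pvCell board i j = ch then some ((i, j) : Int × Int) else none) j := by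
    intro j hj
    have hj' := (PySem.List.mem_pyRange_one).mp hj
    have hcell : PySem.List.pyGetD (PySem.List.pyGetD g i []) j '?' = pvCell board i j := by
      have := cell_agree board m hm hrows i j hi'.1 (by omega) hj'.1 hj'.2
      simpa [gAt, hg] using this
    simp only [hcell]
  rw [Function.comp_def, List.filterMap_congr this, filterMap_if]

-- ===== BFS lockstep =====
-- one step of A's enqueue loop and of B's enqueue loop
def bstep (mv : Int) (st : List (Int × Int × Int) × List (List Bool)) (p : Int × Int) :
    List (Int × Int × Int) × List (List Bool) :=
  if pvVisGet st.2 p.1 p.2 then st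
  else (st.1 ++ [(p.1, p.2, mv + 1)], pvVisSet st.2 p.1 p.2)

def bstepB (mv : Int) (st : List ((Int × Int) × Int) × PySem.Set (Int × Int)) (p : Int × Int) :
    List ((Int × Int) × Int) × PySem.Set (Int × Int) :=
  if st.2.contains p then st
  else (st.1 ++ [(p, mv + 1)], PySem.Set.add st.2 p)

def qmap (q : List (Int × Int × Int)) : List ((Int × Int) × Int) :=
  q.map (fun e => ((e.1, e.2.1), e.2.2))

lemma bstep_mem (mv : Int) :
    ∀ (ps : List (Int × Int)) (q : List (Int × Int × Int)) (vis : List (List Bool))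
      (e : Int × Int × Int), e ∈ (ps.foldl (bstep mv) (q, vis)).1 →
      e ∈ q ∨ ∃ p ∈ ps, e = (p.1, p.2, mv + 1) := by
  intro ps
  induction ps with
  | nil => intro q vis e he; exact Or.inl he
  | cons p ps ih =>
    intro q vis e he
    rw [List.foldl_cons] at he
    unfold bstep at he
    by_cases h : pvVisGet vis p.1 p.2
    · simp only [h, if_pos] at he
      rcases ih q vis e he with h1 | ⟨p', hp', he'⟩
      · exact Or.inl h1
      · exact Or.inr ⟨p', List.mem_cons_of_mem _ hp', he'⟩
    · simp only [h] at he
      rcases ih _ _ e he with h1 | ⟨p', hp', he'⟩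
      · rcases List.mem_append.mp h1 with h2 | h2
        · exact Or.inl h2
        · simp at h2
          exact Or.inr ⟨p, List.mem_cons_self, by rw [h2]⟩
      · exact Or.inr ⟨p', List.mem_cons_of_mem _ hp', he'⟩

-- the visited-grid primitives of A, characterised (shape-respecting)
def Shape (n m : Int) (vis : List (List Bool)) : Prop :=
  vis.length = n.toNat ∧ ∀ (k : Nat) (h : k < vis.length), (vis[k]).length = m.toNat

lemma visSet_shape (n m : Int) (vis : List (List Bool)) (a b : Int)
    (hs : Shape n m vis) (ha : 0 ≤ a) (hb : 0 ≤ b) : Shape n m (pvVisSet vis a b) := by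
  obtain ⟨h1, h2⟩ := hs
  unfold pvVisSet
  rw [PySem.List.pySetD_of_nonneg _ _ ha]
  constructor
  · simp [h1]
  · intro k hk
    rw [List.getElem_set]
    split_ifs with hka
    · subst hka
      rw [PySem.List.pySetD_of_nonneg _ _ hb]
      rw [PySem.List.pyGet?_of_nonneg _ ha]
      by_cases hin : a.toNat < vis.length
      · rw [List.getElem?_eq_getElem hin]
        simp [h2 _ hin]
      · rw [List.getElem?_eq_none (by omega)]
        simp at hk; omega
    · exact h2 k (by simpa using hk)

lemma visGet_visSet (n m : Int) (vis : List (List Bool)) (a b x y : Int)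
    (hs : Shape n m vis)
    (ha : 0 ≤ a) (han : a < n) (hb : 0 ≤ b) (hbm : b < m)
    (hx : 0 ≤ x) (hxn : x < n) (hy : 0 ≤ y) (hym : y < m) :
    pvVisGet (pvVisSet vis a b) x y =
      if x = a ∧ y = b then true else pvVisGet vis x y := by
  obtain ⟨h1, h2⟩ := hs
  have haN : a.toNat < vis.length := by omega
  have hxN : x.toNat < vis.length := by omega
  have hbN : b.toNat < (vis[a.toNat]).length := by rw [h2 _ haN]; omega
  have hrow : (PySem.List.pyGet? vis a).getD [] = vis[a.toNat] := by
    rw [PySem.List.pyGet?_of_nonneg _ ha, List.getElem?_eq_getElem haN]; rfl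
  unfold pvVisSet pvVisGet
  rw [hrow, PySem.List.pySetD_of_nonneg _ _ ha, PySem.List.pySetD_of_nonneg _ _ hb,
    PySem.List.pyGet?_of_nonneg (i := x) _ hx, List.getElem?_set]
  by_cases hxa : x = a
  · subst hxa
    rw [if_pos rfl, if_pos haN]
    simp only [Option.bind_some]
    rw [PySem.List.pyGet?_of_nonneg (i := y) _ hy, List.getElem?_set]
    by_cases hyb : y = b
    · subst hyb
      rw [if_pos rfl, if_pos hbN]
      simp
    · rw [if_neg (by omega), if_neg (fun hcon => hyb hcon.2),
        PySem.List.pyGet?_of_nonneg vis hx, List.getElem?_eq_getElem hxN]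
      simp only [Option.bind_some]
      rw [PySem.List.pyGet?_of_nonneg _ hy]
  · rw [if_neg (by omega), if_neg (fun hcon => hxa hcon.1),
      PySem.List.pyGet?_of_nonneg vis hx, List.getElem?_eq_getElem hxN]

lemma visInit_shape (n m : Int) (hn : 0 ≤ n) : Shape n m (pvVisInit n m) := by
  unfold pvVisInit
  constructor
  · rw [List.length_map, PySem.List.pyRange_of_pos _ _ (by norm_num : (0:Int) < 1)]
    simp
    omega
  · intro k hk
    simp

lemma visInit_get (n m : Int) (x y : Int)
    (hx : 0 ≤ x) (hxn : x < n) (hy : 0 ≤ y) (hym : y < m) :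
    pvVisGet (pvVisInit n m) x y = false := by
  have hs := visInit_shape n m (by omega)
  obtain ⟨h1, h2⟩ := hs
  have hxN : x.toNat < (pvVisInit n m).length := by omega
  unfold pvVisGet
  rw [PySem.List.pyGet?_of_nonneg _ hx, List.getElem?_eq_getElem hxN]
  simp only [Option.getD_some, Option.bind_some]
  rw [PySem.List.pyGet?_of_nonneg _ hy]
  have : (pvVisInit n m)[x.toNat] = List.replicate m.toNat false := by
    unfold pvVisInit
    rw [List.getElem_map]
  rw [this, List.getElem?_eq_getElem (by simp; omega)]
  simp

-- the combined neighbour-fold lockstep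
lemma nbfold_eq (n m : Int) (mv : Int) :
    ∀ (ps : List (Int × Int)) (qA : List (Int × Int × Int)) (vis : List (List Bool))
      (V : PySem.Set (Int × Int)),
      (∀ p ∈ ps, 0 ≤ p.1 ∧ p.1 < n ∧ 0 ≤ p.2 ∧ p.2 < m) →
      Shape n m vis →
      (∀ x y : Int, 0 ≤ x → x < n → 0 ≤ y → y < m →
        pvVisGet vis x y = V.contains (x, y)) →
      (ps.foldl (bstepB mv) (qmap qA, V)).1 = qmap ((ps.foldl (bstep mv) (qA, vis)).1) ∧
      Shape n m ((ps.foldl (bstep mv) (qA, vis)).2) ∧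
      (∀ x y : Int, 0 ≤ x → x < n → 0 ≤ y → y < m →
        pvVisGet ((ps.foldl (bstep mv) (qA, vis)).2) x y =
          ((ps.foldl (bstepB mv) (qmap qA, V)).2).contains (x, y)) := by
  intro ps
  induction ps with
  | nil => intro qA vis V _ hs hinv; exact ⟨rfl, hs, hinv⟩
  | cons p ps ih =>
    intro qA vis V hr hs hinv
    have hp := hr p List.mem_cons_self
    rw [List.foldl_cons, List.foldl_cons]
    have hcond : pvVisGet vis p.1 p.2 = V.contains p := by
      have := hinv p.1 p.2 hp.1 hp.2.1 hp.2.2.1 hp.2.2.2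
      simpa using this
    unfold bstep bstepB
    by_cases h : pvVisGet vis p.1 p.2
    · rw [if_pos h, if_pos (by rw [← hcond]; exact h)]
      exact ih qA vis V (fun q hq => hr q (List.mem_cons_of_mem _ hq)) hs hinv
    · rw [if_neg h, if_neg (by rw [← hcond]; exact h)]
      have hadd : PySem.Set.add V p = V ++ [p] := by
        unfold PySem.Set.add
        rw [if_neg (by rw [← hcond]; exact h)]
      have hs' : Shape n m (pvVisSet vis p.1 p.2) :=
        visSet_shape n m vis _ _ ⟨(by exact hs.1), hs.2⟩ hp.1 hp.2.2.1
      have hinv' : ∀ x y : Int, 0 ≤ x → x < n → 0 ≤ y → y < m →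
          pvVisGet (pvVisSet vis p.1 p.2) x y = (PySem.Set.add V p).contains (x, y) := by
        intro x y hx hxn hy hym
        rw [visGet_visSet n m vis p.1 p.2 x y hs hp.1 hp.2.1 hp.2.2.1 hp.2.2.2
          hx hxn hy hym, hadd]
        by_cases hxy : (x, y) = p
        · rw [if_pos ⟨congrArg Prod.fst hxy, congrArg Prod.snd hxy⟩]
          simp [List.contains_append, hxy]
        · rw [if_neg (fun hcon => hxy (by rw [hcon.1, hcon.2]))]
          rw [hinv x y hx hxn hy hym]
          simp [List.contains_append, hxy]
      have hq' : qmap qA ++ [(p, mv + 1)] = qmap (qA ++ [(p.1, p.2, mv + 1)]) := by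
        simp [qmap]
      rw [hq']
      exact ih (qA ++ [(p.1, p.2, mv + 1)]) (pvVisSet vis p.1 p.2) (PySem.Set.add V p)
        (fun q hq => hr q (List.mem_cons_of_mem _ hq)) hs' hinv'

lemma bfs_eq (board : List String) (n m : Int) (t : Int × Int)
    (dU dDn dL dR : PySem.Dict (Int × Int) Int)
    (hU : ∀ x y : Int, 0 ≤ x → x < n → 0 ≤ y → y < m →
      dU.getD (x, y) 0 = wU (pvCell board) y x.toNat)
    (hDn : ∀ x y : Int, 0 ≤ x → x < n → 0 ≤ y → y < m →
      dDn.getD (x, y) 0 = vD (pvCell board) y n (n - 1 - x).toNat)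
    (hL : ∀ x y : Int, 0 ≤ x → x < n → 0 ≤ y → y < m →
      dL.getD (x, y) 0 = wL (pvCell board) x y.toNat)
    (hR : ∀ x y : Int, 0 ≤ x → x < n → 0 ≤ y → y < m →
      dR.getD (x, y) 0 = vR (pvCell board) x m (m - 1 - y).toNat) :
    ∀ (f : Nat) (q : List (Int × Int × Int)) (vis : List (List Bool))
      (V : PySem.Set (Int × Int)),
      (∀ e ∈ q, 0 ≤ e.1 ∧ e.1 < n ∧ 0 ≤ e.2.1 ∧ e.2.1 < m) →
      Shape n m vis →
      (∀ x y : Int, 0 ≤ x → x < n → 0 ≤ y → y < m →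
        pvVisGet vis x y = V.contains (x, y)) →
      bfsA board n m t f q vis = bfsB dU dDn dL dR t f (qmap q) V := by
  intro f
  induction f with
  | zero => intro q vis V _ _ _; rfl
  | succ f ih =>
    intro q vis V hq hs hinv
    match q with
    | [] => rfl
    | (x, y, mv) :: qs =>
      have hxy := hq (x, y, mv) List.mem_cons_self
      simp only at hxy
      obtain ⟨hx, hxn, hy, hym⟩ := hxy
      have hqm : qmap ((x, y, mv) :: qs) = ((x, y), mv) :: qmap qs := rfl
      rw [hqm, bfsA, bfsB]
      by_cases ht : (x, y) = t
      · simp only [ht, if_pos]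
      · simp only [ht, if_false]
        have hfu : x.toNat < (n + m).toNat + 1 := by omega
        have hfd : (n - 1 - x).toNat < (n + m).toNat + 1 := by omega
        have hfl : y.toNat < (n + m).toNat + 1 := by omega
        have hfr : (m - 1 - y).toNat < (n + m).toNat + 1 := by omega
        have hsu := slide_up board n m ((n + m).toNat + 1) x y hx hxn hy hym hfu
        have hsd := slide_down board n m ((n + m).toNat + 1) x y hx hxn hy hym hfd
        have hsl := slide_left board n m ((n + m).toNat + 1) x y hx hxn hy hym hfl
        have hsr := slide_right board n m ((n + m).toNat + 1) x y hx hxn hy hym hfr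
        have hA : ([((-1 : Int), (0 : Int)), (1, 0), (0, -1), (0, 1)].foldl
            (fun (st : List (Int × Int × Int) × List (List Bool)) d =>
              let p := slideA board n m d.1 d.2 ((n + m).toNat + 1) (x, y)
              if pvVisGet st.2 p.1 p.2 then st
              else (st.1 ++ [(p.1, p.2, mv + 1)], pvVisSet st.2 p.1 p.2)) (qs, vis)) =
            ([slideA board n m (-1) 0 ((n + m).toNat + 1) (x, y),
              slideA board n m 1 0 ((n + m).toNat + 1) (x, y),
              slideA board n m 0 (-1) ((n + m).toNat + 1) (x, y),
              slideA board n m 0 1 ((n + m).toNat + 1) (x, y)].foldl (bstep mv) (qs, vis)) := rfl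
        have hB : ([(dU.getD (x, y) 0, y), (dDn.getD (x, y) 0, y),
              (x, dL.getD (x, y) 0), (x, dR.getD (x, y) 0)].foldl
            (fun (st : List ((Int × Int) × Int) × PySem.Set (Int × Int)) nb =>
              if st.2.contains nb then st
              else (st.1 ++ [(nb, mv + 1)], PySem.Set.add st.2 nb)) (qmap qs, V)) =
            ([(dU.getD (x, y) 0, y), (dDn.getD (x, y) 0, y),
              (x, dL.getD (x, y) 0), (x, dR.getD (x, y) 0)].foldl (bstepB mv) (qmap qs, V)) := rfl
        rw [hA, hB, hsu, hsd, hsl, hsr,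
          hU x y hx hxn hy hym, hDn x y hx hxn hy hym, hL x y hx hxn hy hym,
          hR x y hx hxn hy hym]
        set ps : List (Int × Int) := [(wU (pvCell board) y x.toNat, y),
          (vD (pvCell board) y n (n - 1 - x).toNat, y),
          (x, wL (pvCell board) x y.toNat), (x, vR (pvCell board) x m (m - 1 - y).toNat)]
          with hps
        have hpr : ∀ p ∈ ps, 0 ≤ p.1 ∧ p.1 < n ∧ 0 ≤ p.2 ∧ p.2 < m := by
          have hru := slide_in_range board n m (-1) 0 ((n + m).toNat + 1) x y hx hxn hy hym
          have hrd := slide_in_range board n m 1 0 ((n + m).toNat + 1) x y hx hxn hy hym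
          have hrl := slide_in_range board n m 0 (-1) ((n + m).toNat + 1) x y hx hxn hy hym
          have hrr := slide_in_range board n m 0 1 ((n + m).toNat + 1) x y hx hxn hy hym
          rw [hsu] at hru
          rw [hsd] at hrd
          rw [hsl] at hrl
          rw [hsr] at hrr
          intro p hp
          rw [hps] at hp
          simp only [List.mem_cons, List.not_mem_nil, or_false] at hp
          rcases hp with h | h | h | h
          all_goals subst h
          · simpa using hru
          · simpa using hrd
          · simpa using hrl
          · simpa using hrr
        obtain ⟨hq1, hs1, hinv1⟩ := nbfold_eq n m mv ps qs vis V hpr hs hinv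
        rw [hq1]
        apply ih
        · intro e he
          rcases bstep_mem mv ps qs vis e he with h1 | ⟨p, hp, he'⟩
          · exact hq e (List.mem_cons_of_mem _ h1)
          · have := hpr p hp
            subst he'
            simpa using this
        · exact hs1
        · exact hinv1

-- ===== assembly =====
lemma ports_eq (board : List String) (hpre : Pre_solution board) :
    solution board = solution_alt board := by
  obtain ⟨hne, hrows⟩ := hpre
  simp only [solution, solution_alt]
  set n := PySem.List.len board with hn
  set m := PySem.Str.len ((PySem.List.pyGet? board 0).getD "") with hmdef
  set grid := board.map (fun r => (PySem.Str.slice r none (some m)).toList) with hgrid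
  have hm0 : 0 ≤ m := by
    rw [hmdef, PySem.Str.len_eq]
    omega
  have hnlen : n = (board.length : Int) := by simp [hn, PySem.List.len]
  have hrows' : ∀ s ∈ board, m.toNat ≤ s.toList.length := by
    intro s hs
    have hhead : (PySem.List.pyGet? board 0).getD "" = board.headD "" := by
      cases board with
      | nil => simp at hne
      | cons a l => simp [PySem.List.pyGet?_of_nonneg _ (le_refl (0:Int))]
    have : m = ((board.headD "").toList.length : Int) := by
      rw [hmdef, hhead, PySem.Str.len_eq]
    have := hrows s hs
    omega
  have hscan := scan_eq board n m
  have hrp := rposs_eq board n m 'R' hnlen hm0 hrows'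
  have hgp := rposs_eq board n m 'G' hnlen hm0 hrows'
  rw [hscan]
  rw [show PySem.List.pyGet? (rposs grid 'R') (-1) = (rposs grid 'R').getLast? from
    PySem.List.pyGet?_neg_one _]
  rw [show PySem.List.pyGet? (rposs grid 'G') (-1) = (rposs grid 'G').getLast? from
    PySem.List.pyGet?_neg_one _]
  rw [← hgrid] at hrp hgp
  rw [hrp, hgp]
  cases hR : (hits board n m 'R').getLast? with
  | none => simp
  | some s =>
    cases hG : (hits board n m 'G').getLast? with
    | none => simp
    | some t =>
      simp only
      have hsmem : s ∈ hits board n m 'R' := List.mem_of_getLast? hR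
      have hsr := hits_range board n m 'R' s hsmem
      -- cell agreement, for the wall tables
      have hcell : ∀ i j : Int, 0 ≤ i → i < n → 0 ≤ j → j < m →
          gAt grid i j = pvCell board i j := by
        intro i j h1 h2 h3 h4
        rw [hgrid]
        exact cell_agree board m hm0 hrows' i j h1 (by omega) h3 h4
      apply bfs_eq board n m t _ _ _ _ ?hU ?hDn ?hL ?hR ((n * m).toNat + 1)
        [(s.1, s.2, 0)] _ _ ?hq ?hs ?hinv
      case hU =>
        intro x y hx hxn hy hym
        rw [PySem.Dict.getD_eq_get?_getD, (tblUD_spec _ n m x y hx hxn hy hym).1,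
          Option.getD_some]
        exact wU_agree _ _ y n (fun i h1 h2 => hcell i y h1 h2 hy hym) x.toNat (by omega)
      case hDn =>
        intro x y hx hxn hy hym
        rw [PySem.Dict.getD_eq_get?_getD, (tblUD_spec _ n m x y hx hxn hy hym).2,
          Option.getD_some]
        exact vD_agree _ _ y n (fun i h1 h2 => hcell i y h1 h2 hy hym)
          (n - 1 - x).toNat (by omega)
      case hL =>
        intro x y hx hxn hy hym
        rw [PySem.Dict.getD_eq_get?_getD, (tblLR_spec _ n m x y hx hxn hy hym).1,
          Option.getD_some]
        exact wL_agree _ _ x m (fun j h1 h2 => hcell x j hx hxn h1 h2) y.toNat (by omega)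
      case hR =>
        intro x y hx hxn hy hym
        rw [PySem.Dict.getD_eq_get?_getD, (tblLR_spec _ n m x y hx hxn hy hym).2,
          Option.getD_some]
        exact vR_agree _ _ x m (fun j h1 h2 => hcell x j hx hxn h1 h2)
          (m - 1 - y).toNat (by omega)
      case hq =>
        intro e he
        simp only [List.mem_singleton] at he
        subst he
        simpa using hsr
      case hs =>
        exact visSet_shape n m _ _ _ (visInit_shape n m (by omega)) hsr.1 hsr.2.2.1
      case hinv =>
        intro x y hx hxn hy hym
        rw [visGet_visSet n m _ s.1 s.2 x y (visInit_shape n m (by omega))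
          hsr.1 hsr.2.1 hsr.2.2.1 hsr.2.2.2 hx hxn hy hym]
        have hof : PySem.Set.ofList [s] = [s] := by
          simp [PySem.Set.ofList, PySem.Set.add, PySem.Set.contains]
        rw [hof]
        by_cases hxy : (x, y) = s
        · rw [if_pos ⟨congrArg Prod.fst hxy, congrArg Prod.snd hxy⟩]
          simp [PySem.Set.contains, hxy]
        · rw [if_neg (fun hcon => hxy (by rw [hcon.1, hcon.2])),
            visInit_get n m x y hx hxn hy hym]
          simp [PySem.Set.contains, hxy]

-- ===== VERDICT (by name: the statement is the Claim_ definition above) =====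
theorem solution_spec : Claim_equal_solution := by
  intro board _ hpre
  exact ports_eq board hpre
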